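-- pv_equiv track=rewrite | github.com/marcelodev23/Dev-codes | Programação Estruturada/prova 02/main.py | processa_lista
-- ===== SOURCE A (Python) =====
-- def processa_lista(valores):
--     pares=[]
--     impares=[]
--     for valor in valores:
--         if int(valor) % 2 ==0:
--             pares.append(valor)
--         else:
--             impares.append(valor)
--     return pares[-5:],impares[-5:]
-- ===== SOURCE B (Python) =====
-- def processa_lista(valores):
--     evens = []
--     odds = []
--     for valor in reversed(list(valores)):
--         if len(evens) == 5 and len(odds) == 5:
--             break
--         if int(valor) % 2 == 0:
--             if len(evens) < 5:
--                 evens.append(valor)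
--         else:
--             if len(odds) < 5:
--                 odds.append(valor)
--     return evens[::-1], odds[::-1]
-- ===== Notes on version B (the rewrite author's own statement) =====
-- stated objective: alternative
-- what changed: B walks the list back-to-front keeping two bounded 5-element buffers and stops as soon as both are full, then reverses them, instead of A's full partition followed by [-5:] slices.
import Mathlib
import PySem

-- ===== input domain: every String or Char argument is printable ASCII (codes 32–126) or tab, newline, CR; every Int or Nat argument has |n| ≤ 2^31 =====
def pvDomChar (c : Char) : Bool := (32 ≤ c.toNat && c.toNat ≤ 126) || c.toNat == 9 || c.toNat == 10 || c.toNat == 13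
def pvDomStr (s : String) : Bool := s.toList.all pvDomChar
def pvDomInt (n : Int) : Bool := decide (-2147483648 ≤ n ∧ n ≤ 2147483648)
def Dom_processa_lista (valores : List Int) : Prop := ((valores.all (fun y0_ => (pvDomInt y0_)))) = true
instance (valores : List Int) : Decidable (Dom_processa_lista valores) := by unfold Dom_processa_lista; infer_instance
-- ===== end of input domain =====

-- B re-implements processa_lista by a reverse walk with two bounded 5-element buffers and
-- early exit once both are full (objective: alternative decomposition, same asymptotic cost).

-- ===== PORT A =====
-- Shared test 'int(valor) % 2 == 0' (Python-exact mod); used verbatim by both ports.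
def pvEven (v : Int) : Bool := PySem.Int.mod v 2 == 0

-- Port of A: partition into pares/impares by one forward fold, then take [-5:] of each.
def processa_lista (valores : List Int) : List Int × List Int :=
  let acc := valores.foldl
    (fun (acc : List Int × List Int) v =>
      if pvEven v then (acc.1 ++ [v], acc.2) else (acc.1, acc.2 ++ [v]))
    ([], [])
  (PySem.List.slice acc.1 (some (-5)) none, PySem.List.slice acc.2 (some (-5)) none)

-- ===== PORT B =====
-- B: walk the list back-to-front with two bounded 5-element buffers, stop when both are full,
-- then reverse each buffer.
def pvGoB : List Int → List Int → List Int → List Int × List Int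
  | [], evens, odds => (evens, odds)
  | v :: rest, evens, odds =>
    if evens.length = 5 ∧ odds.length = 5 then (evens, odds)
    else if pvEven v then
      pvGoB rest (if evens.length < 5 then evens ++ [v] else evens) odds
    else
      pvGoB rest evens (if odds.length < 5 then odds ++ [v] else odds)

def processa_lista_alt (valores : List Int) : List Int × List Int :=
  let eo := pvGoB valores.reverse [] []
  (eo.1.reverse, eo.2.reverse)

-- ===== PRECONDITION & SPEC =====
def Spec_processa_lista (valores : List Int) (out : List Int × List Int) : Prop := out = processa_lista_alt valores
instance (valores : List Int) (out : List Int × List Int) : Decidable (Spec_processa_lista valores out) := by unfold Spec_processa_lista; infer_instance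

-- ===== CLAIM (what is proved, stated in full; the proofs are below) =====
def Claim_equal_processa_lista : Prop := ∀ (valores : List Int), Dom_processa_lista valores → Spec_processa_lista valores (processa_lista valores)

-- ===== LEMMAS AND PROOFS =====
theorem pvTakeCons {α : Type} (v : α) (xs : List α) (n : Nat) (hn : 0 < n) :
    (v :: xs).take n = v :: xs.take (n - 1) := by
  cases n with
  | zero => omega
  | succ m => simp

-- The forward fold of A is a partition into (filter even, filter odd).
theorem pvFoldA (l : List Int) : ∀ (p i : List Int),
    l.foldl (fun (acc : List Int × List Int) v =>
      if pvEven v then (acc.1 ++ [v], acc.2) else (acc.1, acc.2 ++ [v])) (p, i)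
    = (p ++ l.filter pvEven, i ++ l.filter (fun v => !pvEven v)) := by
  induction l with
  | nil => intro p i; simp
  | cons v t ih =>
    intro p i
    rw [List.foldl_cons]
    cases h : pvEven v <;> simp [h, ih]

-- B's bounded buffers collect the first 5 evens/odds of the remaining list.
theorem pvGoB_spec (l : List Int) : ∀ (e o : List Int), e.length ≤ 5 → o.length ≤ 5 →
    pvGoB l e o
    = (e ++ (l.filter pvEven).take (5 - e.length),
       o ++ (l.filter (fun v => !pvEven v)).take (5 - o.length)) := by
  induction l with
  | nil => intro e o _ _; simp [pvGoB]
  | cons v t ih =>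
    intro e o he ho
    by_cases hfull : e.length = 5 ∧ o.length = 5
    · simp [pvGoB, hfull.1, hfull.2]
    · rw [pvGoB, if_neg hfull]
      cases h : pvEven v
      · by_cases hlt : o.length < 5
        · rw [if_pos hlt, ih e (o ++ [v]) he (by simp [Nat.succ_le_of_lt hlt]),
            List.filter_cons, List.filter_cons]
          simp only [h, Bool.false_eq_true, if_false, Bool.not_false, if_true,
            List.length_append, List.length_cons, List.length_nil, Nat.zero_add,
            List.append_assoc, List.singleton_append]
          rw [pvTakeCons v _ _ (by omega)]
          congr 2
        · have h5 : o.length = 5 := by omega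
          rw [if_neg hlt, ih e o he ho, List.filter_cons, List.filter_cons]
          simp [h, h5]
      · by_cases hlt : e.length < 5
        · rw [if_pos hlt, ih (e ++ [v]) o (by simp [Nat.succ_le_of_lt hlt]) ho,
            List.filter_cons, List.filter_cons]
          simp only [h, Bool.not_true, Bool.false_eq_true, if_false, if_true,
            List.length_append, List.length_cons, List.length_nil, Nat.zero_add,
            List.append_assoc, List.singleton_append]
          rw [pvTakeCons v _ _ (by omega)]
          congr 2
        · have h5 : e.length = 5 := by omega
          rw [if_neg hlt, ih e o he ho, List.filter_cons, List.filter_cons]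
          simp [h, h5]

-- xs[-5:] as drop.
theorem pvSliceLast5 (xs : List Int) :
    PySem.List.slice xs (some (-5)) none = xs.drop (xs.length - 5) := by
  rw [PySem.List.slice_some_none]; norm_num [pysem]

-- ===== VERDICT (by name: the statement is the Claim_ definition above) =====
theorem processa_lista_spec : Claim_equal_processa_lista := by
  intro valores _
  unfold Spec_processa_lista processa_lista processa_lista_alt
  rw [pvFoldA, pvGoB_spec valores.reverse [] [] (by simp) (by simp)]
  simp only [List.nil_append, pvSliceLast5, List.filter_reverse, List.take_reverse,
    List.reverse_reverse, List.length_nil, Nat.sub_zero]
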